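-- pv_equiv track=rewrite | github.com/xyplex3/fabric-patterns-hub | scripts/filter.py | ensure_blank_after_title
-- ===== SOURCE A (Python) =====
-- def ensure_blank_after_title(text: str) -> str:
--     """Ensure exactly one blank line between the first line and the body."""
--     lines = text.split("\n")
--     if len(lines) < 2:
--         return text
--     title = lines[0]
--     rest = lines[1:]
--     # Strip leading blanks from rest
--     while rest and not rest[0].strip():
--         rest.pop(0)
--     if rest:
--         return title + "\n\n" + "\n".join(rest)
--     return title
-- ===== SOURCE B (Python) =====
-- import re
--
--
-- def ensure_blank_after_title(text: str) -> str:
--     """Ensure exactly one blank line between the first line and the body."""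
--     parts = text.split("\n", 1)
--     if len(parts) == 1:
--         return text
--     title, body = parts
--     stripped = re.sub(r"\A\s*\n", "", body)
--     if stripped.strip():
--         return title + "\n\n" + stripped
--     return title
-- ===== Notes on version B (the rewrite author's own statement) =====
-- stated objective: idiomatic
-- what changed: Replaces the full line split plus a mutating pop(0) loop over a list of lines with a single split at the first newline and one regex substitution that strips the leading blank lines from the body kept as a single string.
import Mathlib
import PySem

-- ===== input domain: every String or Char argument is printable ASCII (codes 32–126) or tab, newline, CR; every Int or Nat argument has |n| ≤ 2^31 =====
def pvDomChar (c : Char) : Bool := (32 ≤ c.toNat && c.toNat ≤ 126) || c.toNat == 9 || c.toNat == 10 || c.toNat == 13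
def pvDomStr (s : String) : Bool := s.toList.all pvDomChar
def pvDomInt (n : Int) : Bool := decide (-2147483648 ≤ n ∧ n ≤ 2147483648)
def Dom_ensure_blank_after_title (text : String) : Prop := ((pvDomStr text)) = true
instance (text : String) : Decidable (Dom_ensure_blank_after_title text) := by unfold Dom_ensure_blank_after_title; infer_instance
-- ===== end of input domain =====

-- B replaces A's full split + mutating pop(0) line loop by split('\n', 1) and one regex
-- substitution on the body kept as a single string (idiomatic; same cost).

-- ===== PORT A =====
-- the 'while rest and not rest[0].strip(): rest.pop(0)' loop
def pvALoop : List (List Char) → List (List Char)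
  | [] => []
  | l :: ls => if PySem.Chars.strip l = [] then pvALoop ls else l :: ls

def ensure_blank_after_title (text : String) : String :=
  let lines := PySem.Chars.splitOn text.toList ['\n']
  if lines.length < 2 then text
  else
    let title := lines.headD []
    let rest := lines.tail
    let rest' := pvALoop rest
    if rest' ≠ [] then String.mk (title ++ ['\n', '\n'] ++ PySem.Chars.join ['\n'] rest')
    else String.mk title

-- ===== PORT B =====
-- Hand port of re.sub(r"\A\s*\n", "", body): the regex matches (greedy \s*, then
-- backtracking to a '\n') exactly the prefix ending at the LAST '\n' inside the maximal
-- leading whitespace run; pvReMatch returns the remainder of the string after that match,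
-- or none when the pattern does not match.  Exact for this pattern on ASCII input.
def pvReMatch : List Char → Option (List Char)
  | [] => none
  | c :: rest =>
    if c = '\n' then some ((pvReMatch rest).getD rest)
    else if PySem.Chars.isspace c then pvReMatch rest
    else none

def ensure_blank_after_title_alt (text : String) : String :=
  match PySem.Chars.splitOnMax text.toList ['\n'] 1 with
  | [title, body] =>
    let stripped := (pvReMatch body).getD body
    if PySem.Chars.strip stripped ≠ [] then String.mk (title ++ ['\n', '\n'] ++ stripped)
    else String.mk title
  | _ => text

-- ===== PRECONDITION & SPEC =====
def Spec_ensure_blank_after_title (text : String) (out : String) : Prop := out = ensure_blank_after_title_alt text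
instance (text : String) (out : String) : Decidable (Spec_ensure_blank_after_title text out) := by unfold Spec_ensure_blank_after_title; infer_instance

-- ===== CLAIM (what is proved, stated in full; the proofs are below) =====
def Claim_equal_ensure_blank_after_title : Prop := ∀ (text : String), Dom_ensure_blank_after_title text → Spec_ensure_blank_after_title text (ensure_blank_after_title text)

-- ===== LEMMAS AND PROOFS =====
def pvSplit : List Char → List (List Char)
  | [] => [[]]
  | c :: r => if c = '\n' then [] :: pvSplit r else (c :: (pvSplit r).headD []) :: (pvSplit r).tail

theorem pvSplit_ne_nil (cs : List Char) : pvSplit cs ≠ [] := by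
  cases cs <;> simp [pvSplit] <;> split <;> simp

theorem pv_go_eq (fuel : Nat) : ∀ (l cur : List Char) (acc : List (List Char)),
    l.length ≤ fuel →
    PySem.Chars.splitOn.go ['\n'] fuel l cur acc
      = acc.reverse ++ (pvSplit l).modifyHead (cur.reverse ++ ·) := by
  induction fuel with
  | zero =>
    intro l cur acc h
    have : l = [] := List.eq_nil_of_length_eq_zero (Nat.le_zero.mp h)
    subst this
    rw [PySem.Chars.splitOn.go]
    simp [pvSplit]
  | succ n ih =>
    intro l cur acc h
    cases l with
    | nil => rw [PySem.Chars.splitOn.go]; simp [pvSplit]; omega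
    | cons c rest =>
      rw [PySem.Chars.splitOn.go]
      by_cases hc : c = '\n'
      · subst hc
        simp only [List.isPrefixOf, BEq.rfl, Bool.and_eq_true, and_self, if_true]
        show PySem.Chars.splitOn.go ['\n'] n (List.drop 1 ('\n' :: rest)) [] (cur.reverse :: acc) = _
        simp only [List.drop_succ_cons, List.drop_zero]
        simp only [List.length_cons] at h
        rw [ih rest [] (cur.reverse :: acc) (by omega)]
        simp [pvSplit]
        rcases hs : pvSplit rest with _ | ⟨a, t⟩
        · exact absurd hs (pvSplit_ne_nil rest)
        · simp
      · have : List.isPrefixOf ['\n'] (c :: rest) = false := by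
          simp [List.isPrefixOf]; exact fun hh => absurd hh.symm hc
        simp only [this, Bool.false_eq_true, if_false]
        simp only [List.length_cons] at h
        rw [ih rest (c :: cur) acc (by omega)]
        simp [pvSplit, hc]
        rcases hs : pvSplit rest with _ | ⟨a, t⟩
        · exact absurd hs (pvSplit_ne_nil rest)
        · simp

theorem pv_splitOn_eq (cs : List Char) : PySem.Chars.splitOn cs ['\n'] = pvSplit cs := by
  rw [PySem.Chars.splitOn, pv_go_eq (cs.length + 1) cs [] [] (by omega)]
  rcases hs : pvSplit cs with _ | ⟨a, t⟩
  · exact absurd hs (pvSplit_ne_nil cs)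
  · simp

def pvSplit1 : List Char → List (List Char)
  | [] => [[]]
  | c :: r => if c = '\n' then [[], r] else (c :: (pvSplit1 r).headD []) :: (pvSplit1 r).tail

theorem pvSplit1_ne_nil (cs : List Char) : pvSplit1 cs ≠ [] := by
  cases cs <;> simp [pvSplit1] <;> split <;> simp

theorem pv_go0_eq (fuel : Nat) (l cur : List Char) (acc : List (List Char)) :
    PySem.Chars.splitOnMax.go ['\n'] fuel 0 l cur acc = acc.reverse ++ [cur.reverse ++ l] := by
  cases fuel with
  | zero => rw [PySem.Chars.splitOnMax.go]; simp
  | succ n =>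
    cases l with
    | nil => rw [PySem.Chars.splitOnMax.go]; simp; omega
    | cons c rest => rw [PySem.Chars.splitOnMax.go]; simp

theorem pv_go1_eq (fuel : Nat) : ∀ (l cur : List Char) (acc : List (List Char)),
    l.length ≤ fuel →
    PySem.Chars.splitOnMax.go ['\n'] fuel 1 l cur acc
      = acc.reverse ++ (pvSplit1 l).modifyHead (cur.reverse ++ ·) := by
  induction fuel with
  | zero =>
    intro l cur acc h
    have : l = [] := List.eq_nil_of_length_eq_zero (Nat.le_zero.mp h)
    subst this
    rw [PySem.Chars.splitOnMax.go]
    simp [pvSplit1]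
  | succ n ih =>
    intro l cur acc h
    cases l with
    | nil => rw [PySem.Chars.splitOnMax.go]; simp [pvSplit1]; omega
    | cons c rest =>
      rw [PySem.Chars.splitOnMax.go]
      by_cases hc : c = '\n'
      · subst hc
        simp only [List.isPrefixOf, BEq.rfl, Bool.and_eq_true, and_self, if_true, one_ne_zero,
          if_false]
        show PySem.Chars.splitOnMax.go ['\n'] n (1 - 1) (List.drop 1 ('\n' :: rest)) [] (cur.reverse :: acc) = _
        simp only [List.drop_succ_cons, List.drop_zero, Nat.sub_self]
        rw [pv_go0_eq]
        simp [pvSplit1]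
      · have hpre : List.isPrefixOf ['\n'] (c :: rest) = false := by
          simp [List.isPrefixOf]; exact fun hh => absurd hh.symm hc
        simp only [hpre, Bool.false_eq_true, if_false, one_ne_zero]
        simp only [List.length_cons] at h
        rw [ih rest (c :: cur) acc (by omega)]
        simp [pvSplit1, hc]
        rcases hs : pvSplit1 rest with _ | ⟨a, t⟩
        · exact absurd hs (pvSplit1_ne_nil rest)
        · simp

theorem pv_splitOnMax_eq (cs : List Char) : PySem.Chars.splitOnMax cs ['\n'] 1 = pvSplit1 cs := by
  rw [PySem.Chars.splitOnMax]
  simp only [show ¬((1:Int) < 0) by norm_num, if_false]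
  rw [show ((1:Int)).toNat = 1 from rfl, pv_go1_eq (cs.length + 1) cs [] [] (by omega)]
  rcases hs : pvSplit1 cs with _ | ⟨a, t⟩
  · exact absurd hs (pvSplit1_ne_nil cs)
  · simp

theorem pvSplit_single : ∀ {cs : List Char}, '\n' ∉ cs → pvSplit cs = [cs] := by
  intro cs
  induction cs with
  | nil => intro _; rfl
  | cons c r ih =>
    intro h
    simp only [List.mem_cons, not_or] at h
    simp [pvSplit, Ne.symm h.1, ih h.2]

theorem pvSplit1_single : ∀ {cs : List Char}, '\n' ∉ cs → pvSplit1 cs = [cs] := by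
  intro cs
  induction cs with
  | nil => intro _; rfl
  | cons c r ih =>
    intro h
    simp only [List.mem_cons, not_or] at h
    simp [pvSplit1, Ne.symm h.1, ih h.2]

theorem pvSplit_append : ∀ {t : List Char}, '\n' ∉ t → ∀ (b : List Char),
    pvSplit (t ++ '\n' :: b) = t :: pvSplit b := by
  intro t
  induction t with
  | nil => intro _ b; simp [pvSplit]
  | cons c r ih =>
    intro h b
    simp only [List.mem_cons, not_or] at h
    simp [pvSplit, Ne.symm h.1, ih h.2 b]

theorem pvSplit1_append : ∀ {t : List Char}, '\n' ∉ t → ∀ (b : List Char),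
    pvSplit1 (t ++ '\n' :: b) = [t, b] := by
  intro t
  induction t with
  | nil => intro _ b; simp [pvSplit1]
  | cons c r ih =>
    intro h b
    simp only [List.mem_cons, not_or] at h
    simp [pvSplit1, Ne.symm h.1, ih h.2 b]

theorem pvSplit_no_nl : ∀ (cs : List Char), ∀ l ∈ pvSplit cs, '\n' ∉ l := by
  intro cs
  induction cs with
  | nil => intro l hl; simp [pvSplit] at hl; simp [hl]
  | cons c r ih =>
    intro l hl
    by_cases hc : c = '\n'
    · subst hc
      simp only [pvSplit, if_true] at hl
      rcases List.mem_cons.mp hl with h | h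
      · simp [h]
      · exact ih l h
    · simp only [pvSplit, hc, if_false] at hl
      rcases List.mem_cons.mp hl with h | h
      · subst h
        rcases hs : pvSplit r with _ | ⟨a, t⟩
        · exact absurd hs (pvSplit_ne_nil r)
        · have := ih a (by simp [hs])
          simp only [List.headD, List.mem_cons, not_or]
          exact ⟨Ne.symm hc, this⟩
      · rcases hs : pvSplit r with _ | ⟨a, t⟩
        · exact absurd hs (pvSplit_ne_nil r)
        · rw [hs] at h
          simp only [List.tail] at h
          exact ih l (by rw [hs]; exact List.mem_cons_of_mem a h)

theorem pvSplit_join : ∀ (cs : List Char), PySem.Chars.join ['\n'] (pvSplit cs) = cs := by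
  intro cs
  induction cs with
  | nil => rfl
  | cons c r ih =>
    by_cases hc : c = '\n'
    · subst hc
      simp only [pvSplit, if_true]
      rcases hs : pvSplit r with _ | ⟨a, t⟩
      · exact absurd hs (pvSplit_ne_nil r)
      · rw [hs] at ih
        rw [PySem.Chars.join_cons_cons]
        simpa using ih
    · simp only [pvSplit, hc, if_false]
      rcases hs : pvSplit r with _ | ⟨a, t⟩
      · exact absurd hs (pvSplit_ne_nil r)
      · rw [hs] at ih
        cases t with
        | nil =>
          simp only [List.headD, List.tail]
          rw [PySem.Chars.join_singleton] at ih ⊢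
          simp [ih]
        | cons b t' =>
          simp only [List.headD, List.tail]
          rw [PySem.Chars.join_cons_cons] at ih ⊢
          simp [← ih]


theorem pv_strip_eq_nil_iff (cs : List Char) :
    PySem.Chars.strip cs = [] ↔ ∀ c ∈ cs, PySem.Chars.isspace c = true := by
  rw [PySem.Chars.strip, PySem.Chars.rstrip, PySem.Chars.lstrip]
  rw [List.reverse_eq_nil_iff, List.dropWhile_eq_nil_iff]
  constructor
  · intro h c hc
    rcases List.mem_append.mp (by rw [List.takeWhile_append_dropWhile]; exact hc :
        c ∈ cs.takeWhile PySem.Chars.isspace ++ cs.dropWhile PySem.Chars.isspace) with h1 | h1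
    · exact List.mem_takeWhile_imp h1
    · exact h c (List.mem_reverse.mpr h1)
  · intro h c hc
    exact h c ((List.dropWhile_sublist _).mem (List.mem_reverse.mp hc))

theorem pvReMatch_suffix : ∀ {cs r : List Char}, pvReMatch cs = some r → r <:+ cs := by
  intro cs
  induction cs with
  | nil => intro r h; simp [pvReMatch] at h
  | cons c rest ih =>
    intro r h
    by_cases hc : c = '\n'
    · subst hc
      simp only [pvReMatch, if_true, Option.some.injEq] at h
      rcases hm : pvReMatch rest with _ | r'
      · rw [hm] at h; simp at h
        exact h ▸ List.suffix_cons _ _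
      · rw [hm] at h; simp at h
        exact h ▸ (ih hm).trans (List.suffix_cons _ _)
    · simp only [pvReMatch, hc, if_false] at h
      split at h
      · exact (ih h).trans (List.suffix_cons _ _)
      · simp at h

theorem pvReMatch_none : ∀ (p : List Char), (∀ c ∈ p, PySem.Chars.isspace c = true ∧ c ≠ '\n') →
    ∀ (x : Char) (s : List Char), ¬ PySem.Chars.isspace x = true → pvReMatch (p ++ x :: s) = none := by
  intro p
  induction p with
  | nil =>
    intro _ x s hx
    have hxn : x ≠ '\n' := fun h => hx (h ▸ rfl)
    simp [pvReMatch, hxn, hx]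
  | cons c p' ih =>
    intro h x s hx
    have hc := h c (by simp)
    simp only [List.cons_append, pvReMatch, hc.2, if_false, hc.1, if_true]
    exact ih (fun d hd => h d (List.mem_cons_of_mem c hd)) x s hx

theorem pvReMatch_blank : ∀ (b : List Char), (∀ c ∈ b, PySem.Chars.isspace c = true) → '\n' ∉ b →
    ∀ (rest : List Char), pvReMatch (b ++ '\n' :: rest) = some ((pvReMatch rest).getD rest) := by
  intro b
  induction b with
  | nil => intro _ _ rest; simp [pvReMatch]
  | cons c b' ih =>
    intro h hn rest
    simp only [List.mem_cons, not_or] at hn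
    simp only [List.cons_append, pvReMatch, Ne.symm hn.1, if_false, h c (by simp), if_true]
    exact ih (fun d hd => h d (List.mem_cons_of_mem c hd)) hn.2 rest


theorem pv_join_cons_ne_nil (l : List Char) {L : List (List Char)} (h : L ≠ []) :
    PySem.Chars.join ['\n'] (l :: L) = l ++ '\n' :: PySem.Chars.join ['\n'] L := by
  rcases L with _ | ⟨b, t⟩
  · exact absurd rfl h
  · rw [PySem.Chars.join_cons_cons]; simp

theorem pv_nonblank_decomp {h : List Char} (hh : PySem.Chars.strip h ≠ []) :
    ∃ w x s, h = w ++ x :: s ∧ (∀ c ∈ w, PySem.Chars.isspace c = true) ∧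
      ¬ PySem.Chars.isspace x = true := by
  have hdw : h.dropWhile PySem.Chars.isspace ≠ [] := by
    intro hnil
    exact hh ((pv_strip_eq_nil_iff h).mpr (List.dropWhile_eq_nil_iff.mp hnil))
  rcases hd : h.dropWhile PySem.Chars.isspace with _ | ⟨x, s⟩
  · exact absurd hd hdw
  · refine ⟨h.takeWhile PySem.Chars.isspace, x, s, ?_, ?_, ?_⟩
    · rw [← hd, List.takeWhile_append_dropWhile]
    · exact fun c hc => List.mem_takeWhile_imp hc
    · have := List.head_dropWhile_not PySem.Chars.isspace hdw
      simp only [hd, List.head_cons] at this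
      simp [this]

theorem pv_main : ∀ (L : List (List Char)), (∀ l ∈ L, '\n' ∉ l) → L ≠ [] →
    (pvALoop L = [] →
      PySem.Chars.strip ((pvReMatch (PySem.Chars.join ['\n'] L)).getD (PySem.Chars.join ['\n'] L)) = [])
    ∧ (pvALoop L ≠ [] →
      (pvReMatch (PySem.Chars.join ['\n'] L)).getD (PySem.Chars.join ['\n'] L)
          = PySem.Chars.join ['\n'] (pvALoop L)
        ∧ PySem.Chars.strip (PySem.Chars.join ['\n'] (pvALoop L)) ≠ []) := by
  intro L
  induction L with
  | nil => intro _ h; exact absurd rfl h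
  | cons l L' ih =>
    intro hnl _
    have hlnl : '\n' ∉ l := hnl l (by simp)
    by_cases hb : PySem.Chars.strip l = []
    · -- l is a blank line: A pops it
      have hws : ∀ c ∈ l, PySem.Chars.isspace c = true := (pv_strip_eq_nil_iff l).mp hb
      have hloop : pvALoop (l :: L') = pvALoop L' := by simp [pvALoop, hb]
      cases L' with
      | nil =>
        -- single blank line: pvReMatch result is a suffix of l, all whitespace
        rw [hloop]
        simp only [pvALoop]
        refine ⟨fun _ => ?_, fun hne => absurd rfl hne⟩
        rw [PySem.Chars.join_singleton]
        rcases hm : pvReMatch l with _ | r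
        · simpa [hm] using hb
        · have hsuf := pvReMatch_suffix hm
          simp only [Option.getD_some]
          exact (pv_strip_eq_nil_iff r).mpr fun c hc => hws c (hsuf.subset hc)
      | cons m L'' =>
        have hne' : (m :: L'') ≠ [] := by simp
        have ih' := ih (fun d hd => hnl d (List.mem_cons_of_mem l hd)) hne'
        rw [hloop]
        rw [pv_join_cons_ne_nil l hne', pvReMatch_blank l hws hlnl]
        simp only [Option.getD_some]
        exact ih'
    · -- l is non-blank: A keeps everything, the regex does not match
      have hloop : pvALoop (l :: L') = l :: L' := by simp [pvALoop, hb]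
      rw [hloop]
      refine ⟨fun hc => by simp at hc, fun _ => ?_⟩
      obtain ⟨w, x, s, hdec, hwws, hx⟩ := pv_nonblank_decomp hb
      have hxmem : x ∈ l := by rw [hdec]; simp
      have hwnl : ∀ c ∈ w, PySem.Chars.isspace c = true ∧ c ≠ '\n' := by
        intro c hc
        exact ⟨hwws c hc, fun hceq => hlnl (hceq ▸ (by rw [hdec]; exact List.mem_append_left _ hc))⟩
      have hnone : pvReMatch (PySem.Chars.join ['\n'] (l :: L')) = none := by
        cases L' with
        | nil =>
          rw [PySem.Chars.join_singleton, hdec]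
          exact pvReMatch_none w hwnl x s hx
        | cons m L'' =>
          rw [pv_join_cons_ne_nil l (by simp), hdec]
          rw [List.append_assoc, List.cons_append]
          exact pvReMatch_none w hwnl x _ hx
      refine ⟨by rw [hnone]; rfl, fun hstrip => ?_⟩
      have := (pv_strip_eq_nil_iff _).mp hstrip x ?_
      · exact hx this
      · cases L' with
        | nil => rw [PySem.Chars.join_singleton]; exact hxmem
        | cons m L'' => rw [pv_join_cons_ne_nil l (by simp)]; exact List.mem_append_left _ hxmem

theorem pv_mem_decomp : ∀ (cs : List Char), '\n' ∈ cs →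
    ∃ t b, cs = t ++ '\n' :: b ∧ '\n' ∉ t := by
  intro cs
  induction cs with
  | nil => intro h; simp at h
  | cons c r ih =>
    intro h
    by_cases hc : c = '\n'
    · exact ⟨[], r, by simp [hc], by simp⟩
    · have hr : '\n' ∈ r := by
        rcases List.mem_cons.mp h with h1 | h1
        · exact absurd h1.symm hc
        · exact h1
      obtain ⟨t, b, hdec, htnl⟩ := ih hr
      refine ⟨c :: t, b, by simp [hdec], ?_⟩
      simp only [List.mem_cons, not_or]
      exact ⟨fun hh => hc hh.symm, htnl⟩


-- ===== VERDICT (by name: the statement is the Claim_ definition above) =====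
theorem ensure_blank_after_title_spec : Claim_equal_ensure_blank_after_title := by
  intro text _
  unfold Spec_ensure_blank_after_title
  show ensure_blank_after_title text = ensure_blank_after_title_alt text
  unfold ensure_blank_after_title ensure_blank_after_title_alt
  rw [pv_splitOn_eq, pv_splitOnMax_eq]
  by_cases hnl : '\n' ∈ text.toList
  · obtain ⟨t, b, hdec, htnl⟩ := pv_mem_decomp _ hnl
    rw [hdec, pvSplit_append htnl, pvSplit1_append htnl]
    have hne := pvSplit_ne_nil b
    have hlen : ¬ ((t :: pvSplit b).length < 2) := by
      have := List.length_pos_of_ne_nil hne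
      simp only [List.length_cons]
      omega
    rw [if_neg hlen]
    have hmain := pv_main (pvSplit b) (pvSplit_no_nl b) hne
    rw [pvSplit_join b] at hmain
    by_cases hl : pvALoop (pvSplit b) = []
    · have hstrip := hmain.1 hl
      simp [hl, hstrip]
    · obtain ⟨heq, hne2⟩ := hmain.2 hl
      simp [hl, heq, hne2]
  · rw [pvSplit_single hnl, pvSplit1_single hnl]
    simp
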